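-- pv_equiv track=rewrite | github.com/nhientattran/Leetcode-Practice | 11_15_2023.py | licenseKeyFormatting
-- ===== SOURCE A (Python) =====
-- def licenseKeyFormatting(s, k):
--     s = s.replace('-', '').upper()
--     first_len = len(s) % k
--     out = s[:first_len]
--
--     if not s:
--         return ''
--
--     for i in range(first_len, len(s), k):
--         out += '-' + s[i:i+k]
--
--
--     if out[0] == '-':
--         return out[1:]
--     return out
-- ===== SOURCE B (Python) =====
-- def licenseKeyFormatting(s, k):
--     out = []
--     cnt = 0
--     for c in reversed(s):
--         if c != '-':
--             if cnt and cnt % k == 0: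
--                 out.append('-')
--             out.append(c.upper())
--             cnt += 1
--     return ''.join(reversed(out))
-- ===== Notes on version B (the rewrite author's own statement) =====
-- stated objective: alternative
-- what changed: B replaces A's len%k arithmetic, slicing loop over index ranges and leading-dash fixup by a single right-to-left character pass with a counter: it walks reversed(s), skips dashes, inserts a '-' whenever the count of emitted characters is a positive multiple of k, and reverses the accumulator at the end; no slices, no length/modulo precomputation, no post-hoc strip.
-- outside the precondition, e.g. on licenseKeyFormatting('abc', -2): A returns 'AB', B returns 'A-BC'; on licenseKeyFormatting('ab', -2): A raises IndexError, B returns 'AB'; on licenseKeyFormatting('a-', 0): A raises ZeroDivisionError, B returns 'A'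
import Mathlib
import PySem

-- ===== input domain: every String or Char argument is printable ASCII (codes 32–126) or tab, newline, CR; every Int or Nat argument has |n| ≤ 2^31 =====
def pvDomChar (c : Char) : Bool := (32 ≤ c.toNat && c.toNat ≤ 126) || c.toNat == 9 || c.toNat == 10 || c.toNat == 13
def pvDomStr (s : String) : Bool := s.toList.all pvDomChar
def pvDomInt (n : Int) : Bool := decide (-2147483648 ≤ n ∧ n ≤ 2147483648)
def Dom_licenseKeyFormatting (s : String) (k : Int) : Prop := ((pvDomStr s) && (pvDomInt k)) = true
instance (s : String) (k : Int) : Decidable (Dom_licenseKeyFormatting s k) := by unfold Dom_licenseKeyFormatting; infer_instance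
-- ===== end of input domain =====

-- B replaces A's len%k arithmetic, index-range slicing loop and leading-dash fixup by one
-- right-to-left character pass with a counter (objective: alternative decomposition, same cost).

-- ===== PORT A =====
def licenseKeyFormatting (s : String) (k : Int) : String :=
  let t := PySem.Chars.upper (PySem.Chars.replace s.toList ['-'] [])
  let firstLen := PySem.Int.mod (t.length : Int) k
  let out0 := PySem.List.slice t none (some firstLen)
  if t = [] then ""
  else
    let out := (PySem.List.pyRange firstLen (t.length : Int) k).foldl
        (fun acc i => acc ++ ('-' :: PySem.List.slice t (some i) (some (i + k)))) out0
    if PySem.List.pyGet? out 0 = some '-' then String.ofList (PySem.List.slice out (some 1) none)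
    else String.ofList out

-- ===== PORT B =====
-- loop body of Source B: on a non-dash char, append '-' when the emitted-count is a positive
-- multiple of k, then append the uppercased char and bump the count
def pvStep (k : Int) (st : List Char × Int) (d : Char) : List Char × Int :=
  ((if st.2 ≠ 0 ∧ PySem.Int.mod st.2 k = 0 then st.1 ++ ['-'] else st.1) ++ [d], st.2 + 1)

def licenseKeyFormatting_alt (s : String) (k : Int) : String :=
  let st := s.toList.reverse.foldl
      (fun st c => if c != '-' then pvStep k st (PySem.Chars.upperChar c) else st)
      (([] : List Char), (0 : Int))
  String.ofList st.1.reverse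

-- ===== PRECONDITION & SPEC =====
-- length of the cleaned key (dashes removed), used by Pre_ only
def pvCleanLen (s : String) : Int := ((s.toList.filter (fun c => c != '-')).length : Int)

-- Pre_ admits every 0 < k and the k < 0 inputs whose cleaned key is empty (both return '');
-- it excludes k = 0, where A raises ZeroDivisionError, and k < 0 with a nonempty cleaned key,
-- where A raises IndexError or returns a value on the unspecified negative-group-size corner,
-- on which A's and B's values are equally arbitrary (no grouping is meaningful there).
def Pre_licenseKeyFormatting (s : String) (k : Int) : Prop :=
  0 < k ∨ (k < 0 ∧ pvCleanLen s = 0)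
instance (s : String) (k : Int) : Decidable (Pre_licenseKeyFormatting s k) := by
  unfold Pre_licenseKeyFormatting; infer_instance
def pvWitness_licenseKeyFormatting : String × Int := ("5F3Z-2e-9-w", 4)

def Spec_licenseKeyFormatting (s : String) (k : Int) (out : String) : Prop :=
  out = licenseKeyFormatting_alt s k
instance (s : String) (k : Int) (out : String) : Decidable (Spec_licenseKeyFormatting s k out) := by
  unfold Spec_licenseKeyFormatting; infer_instance

-- ===== CLAIM (what is proved, stated in full; the proofs are below) =====
def Claim_equal_licenseKeyFormatting : Prop := ∀ (s : String) (k : Int), Dom_licenseKeyFormatting s k → Pre_licenseKeyFormatting s k → Spec_licenseKeyFormatting s k (licenseKeyFormatting s k)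

-- ===== LEMMAS AND PROOFS =====

theorem pv_char_toNat_ofNat (n : Nat) (h : n.isValidChar) : (Char.ofNat n).toNat = n := by
  simp only [Char.ofNat, dif_pos h, Char.ofNatAux, Char.toNat]
  simp [UInt32.toNat_ofNatLT]

theorem pv_replace_go_dash : ∀ (fuel : Nat) (l acc : List Char), l.length ≤ fuel →
    PySem.Chars.replace.go ['-'] [] fuel l acc = acc.reverse ++ l.filter (fun c => c != '-') := by
  intro fuel
  induction fuel with
  | zero => intro l acc h; simp at h; subst h; simp [PySem.Chars.replace.go]
  | succ n ih =>
    intro l acc h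
    cases l with
    | nil => simp [PySem.Chars.replace.go]
    | cons c t =>
      simp only [List.length_cons] at h
      simp only [PySem.Chars.replace.go]
      by_cases hc : c = '-'
      · subst hc
        simp [List.isPrefixOf, ih t acc (by omega)]
      · have hpre : (['-'].isPrefixOf (c :: t)) = false := by
          simp [List.isPrefixOf]
          exact fun h' => absurd h'.symm hc
        simp [hpre, ih t (c :: acc) (by omega), hc]

theorem pv_replace_dash (cs : List Char) :
    PySem.Chars.replace cs ['-'] [] = cs.filter (fun c => c != '-') := by
  simp [PySem.Chars.replace, pv_replace_go_dash cs.length cs [] le_rfl]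

-- the cleaned key as a character list (proof-side name for the first line of A / the pass of B)
def pvClean (s : String) : List Char :=
  PySem.Chars.upper (PySem.Chars.replace s.toList ['-'] [])

theorem pv_clean_eq (s : String) :
    pvClean s = (s.toList.filter (fun c => c != '-')).map PySem.Chars.upperChar := by
  simp [pvClean, pv_replace_dash, PySem.Chars.upper]

theorem pv_dash_not_mem (s : String) : '-' ∉ pvClean s := by
  rw [pv_clean_eq]
  intro hmem
  simp only [List.mem_map] at hmem
  obtain ⟨c, hc, heq⟩ := hmem
  simp only [List.mem_filter, bne_iff_ne, ne_eq] at hc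
  simp only [PySem.Chars.upperChar] at heq
  split at heq
  · next hl =>
    simp only [PySem.Chars.islower, Bool.and_eq_true, decide_eq_true_eq] at hl
    have h1 : 97 ≤ c.toNat := hl.1
    have h2 : c.toNat ≤ 122 := hl.2
    have hv : (c.toNat - 32).isValidChar := Or.inl (by omega)
    have h45 := congrArg Char.toNat heq
    rw [pv_char_toNat_ofNat _ hv] at h45
    have : c.toNat - 32 = 45 := h45
    omega
  · exact hc.2 heq

theorem pv_head_ne (t : List Char) (hne : t ≠ []) (hnd : '-' ∉ t) : t[0]? ≠ some '-' := by
  cases t with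
  | nil => exact absurd rfl hne
  | cons c r =>
    simp only [List.getElem?_cons_zero, ne_eq, Option.some.injEq]
    intro hc
    exact hnd (by simp [hc])

theorem pv_pyRange_pos_nil (a b k : Int) (hk : 0 < k) (h : b ≤ a) :
    PySem.List.pyRange a b k = [] := by
  simp [PySem.List.pyRange, hk.ne', hk, not_lt.mpr h]

theorem pv_pyRange_pos_cons (a b k : Int) (hk : 0 < k) (h : a < b) :
    PySem.List.pyRange a b k = a :: PySem.List.pyRange (a + k) b k := by
  simp only [PySem.List.pyRange, if_neg hk.ne', if_pos hk, if_pos h]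
  have hc : ((b - a + k - 1) / k).toNat = ((b - (a + k) + k - 1) / k).toNat + 1 := by
    have e1 : b - a + k - 1 = (b - (a + k) + k - 1) + 1 * k := by ring
    rw [e1, Int.add_mul_ediv_right _ _ hk.ne']
    have hnn : 0 ≤ (b - (a + k) + k - 1) / k := Int.ediv_nonneg (by omega) hk.le
    omega
  rw [hc, List.range_succ_eq_map]
  by_cases h2 : a + k < b
  · simp only [if_pos h2, List.map_cons]
    congr 1
    · push_cast; ring
    · rw [List.map_map]
      apply List.map_congr_left
      intro x _; simp; push_cast; ring
  · simp only [if_neg h2]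
    have h0 : (b - (a + k) + k - 1) / k = 0 :=
      Int.ediv_eq_zero_of_lt (by omega) (by omega)
    rw [h0]
    simp

theorem pv_pyRange_pos_snoc (a b k : Int) (hk : 0 < k) (h : a < b) (hd : k ∣ b - a) :
    PySem.List.pyRange a b k = PySem.List.pyRange a (b - k) k ++ [b - k] := by
  simp only [PySem.List.pyRange, if_neg hk.ne', if_pos hk, if_pos h]
  obtain ⟨q, hq⟩ := hd
  have hq1 : 1 ≤ q := by nlinarith
  have hcount : ((b - a + k - 1) / k).toNat = q.toNat := by
    have e : b - a + k - 1 = (k - 1) + q * k := by linear_combination hq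
    rw [e, Int.add_mul_ediv_right _ _ hk.ne', Int.ediv_eq_zero_of_lt (by omega) (by omega)]
    omega
  rw [hcount]
  have hq' : q.toNat = (q.toNat - 1) + 1 := by omega
  rw [hq', List.range_succ, List.map_append]
  congr 1
  · by_cases h2 : a < b - k
    · simp only [if_pos h2]
      have e2 : ((b - k - a + k - 1) / k).toNat = q.toNat - 1 := by
        have e : b - k - a + k - 1 = (k - 1) + (q - 1) * k := by linear_combination hq
        rw [e, Int.add_mul_ediv_right _ _ hk.ne', Int.ediv_eq_zero_of_lt (by omega) (by omega)]
        omega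
      rw [e2]
    · simp only [if_neg h2]
      have hq2 : q = 1 := by nlinarith
      subst hq2
      simp
  · simp only [List.map_cons, List.map_nil]
    have e3 : (↑(q.toNat - 1) : Int) = q - 1 := by omega
    rw [e3]
    have e4 : a + k * (q - 1) = b - k := by linear_combination -hq
    rw [e4]

theorem pv_slice_take (t : List Char) (m : Nat) (a b : Int) (ha : 0 ≤ a) (hb : 0 ≤ b)
    (h : b.toNat ≤ m) :
    PySem.List.slice (t.take m) (some a) (some b) = PySem.List.slice t (some a) (some b) := by
  rw [PySem.List.slice_toNat _ ha hb, PySem.List.slice_toNat _ ha hb, List.drop_take,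
    List.take_take]
  congr 1
  omega

-- the ascending groups-of-k decomposition both programs produce
def pvChunks (t : List Char) (k : Nat) : List (List Char) :=
  if _h : t.length ≤ k ∨ k = 0 then [t]
  else pvChunks (t.take (t.length - k)) k ++ [t.drop (t.length - k)]
  termination_by t.length
  decreasing_by simp; omega

theorem pvChunks_ne_nil (t : List Char) (k : Nat) : pvChunks t k ≠ [] := by
  rw [pvChunks]
  split <;> simp

theorem pv_join_append_singleton (sep y : List Char) (xs : List (List Char)) (h : xs ≠ []) :
    PySem.Chars.join sep (xs ++ [y]) = PySem.Chars.join sep xs ++ sep ++ y := by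
  induction xs with
  | nil => exact absurd rfl h
  | cons p rest ih =>
    cases rest with
    | nil => simp [PySem.Chars.join_singleton, PySem.Chars.join_cons_cons]
    | cons q r =>
      have e1 : (p :: q :: r) ++ [y] = p :: (q :: (r ++ [y])) := by simp
      rw [e1, PySem.Chars.join_cons_cons, PySem.Chars.join_cons_cons,
        show q :: (r ++ [y]) = (q :: r) ++ [y] by simp, ih (by simp)]
      simp [List.append_assoc]

-- A's raw accumulated string: optional leading dash plus the joined chunk decomposition
theorem pv_A_raw (k : Int) (hk : 1 ≤ k) :
    ∀ (n : Nat) (t : List Char), t.length = n → t ≠ [] →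
    (PySem.List.pyRange (PySem.Int.mod (t.length : Int) k) (t.length : Int) k).foldl
        (fun acc i => acc ++ ('-' :: PySem.List.slice t (some i) (some (i + k)))) 
        (PySem.List.slice t none (some (PySem.Int.mod (t.length : Int) k)))
      = (if PySem.Int.mod (t.length : Int) k = 0 then ['-'] else [])
          ++ PySem.Chars.join ['-'] (pvChunks t k.toNat) := by
  intro n
  induction n using Nat.strong_induction_on with
  | _ n ih =>
    intro t ht hne
    have hk0 : (0:Int) < k := by omega
    have hlen : 0 < t.length := List.length_pos_of_ne_nil hne
    have hkc : ((k.toNat : Int)) = k := Int.toNat_of_nonneg (by omega)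
    rw [PySem.Int.mod_eq_emod_of_pos hk0]
    set L : Int := (t.length : Int) with hL
    have hF0 : 0 ≤ L % k := Int.emod_nonneg _ (by omega)
    have hFk : L % k < k := Int.emod_lt_of_pos _ hk0
    rw [PySem.List.foldl_append_eq_flatMap, PySem.List.slice_to _ hF0]
    by_cases hsmall : t.length ≤ k.toNat
    · rw [pvChunks, dif_pos (Or.inl hsmall), PySem.Chars.join_singleton]
      by_cases heq : t.length = k.toNat
      · have hF : L % k = 0 := by
          rw [hL, heq, hkc, Int.emod_self]
        rw [hF]
        simp only [if_pos rfl, Int.toNat_zero, List.take_zero, List.nil_append]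
        rw [pv_pyRange_pos_cons _ _ _ hk0 (by omega), pv_pyRange_pos_nil _ _ _ hk0 (by omega)]
        simp only [List.flatMap_cons, List.flatMap_nil, List.append_nil, zero_add]
        rw [PySem.List.slice_toNat _ le_rfl (by omega)]
        simp only [Int.toNat_zero, Nat.sub_zero, List.drop_zero]
        rw [List.take_of_length_le (by omega)]
        simp
      · have hLk : L < k := by omega
        have hF : L % k = L := Int.emod_eq_of_lt (by positivity) hLk
        rw [hF, pv_pyRange_pos_nil _ _ _ hk0 le_rfl]
        simp only [List.flatMap_nil, List.append_nil]
        rw [if_neg (by omega), List.nil_append]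
        simp [hL]
    · -- inductive step: strip the last chunk of k characters
      have hkL : k < L := by omega
      have hq : k * (L / k) + L % k = L := Int.ediv_add_emod L k
      have hq1 : 1 ≤ L / k := by
        have h2 := Int.ediv_le_ediv hk0 hkL.le
        rwa [Int.ediv_self hk0.ne'] at h2
      have hFle : L % k ≤ L - k := by nlinarith
      have hdvd : k ∣ L - L % k := ⟨L / k, by linarith⟩
      have hlt' : (t.take (t.length - k.toNat)).length = t.length - k.toNat := by simp
      have hcast : (((t.take (t.length - k.toNat)).length : Nat) : Int) = L - k := by
        rw [hlt']; push_cast; omega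
      rw [pv_pyRange_pos_snoc _ _ _ hk0 (by omega) hdvd, List.flatMap_append]
      have hg : (PySem.List.pyRange (L % k) (L - k) k).flatMap
            (fun i => '-' :: PySem.List.slice t (some i) (some (i + k)))
          = (PySem.List.pyRange (L % k) (L - k) k).flatMap
            (fun i => '-' :: PySem.List.slice (t.take (t.length - k.toNat)) (some i) (some (i + k))) := by
        rw [List.flatMap_def, List.flatMap_def]
        congr 1
        apply List.map_congr_left
        intro i hi
        obtain ⟨hi1, hi2, hi3⟩ := (PySem.List.mem_pyRange_iff_of_pos hk0 i).mp hi
        have hdl : k ∣ L - k - i := by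
          have d1 : k ∣ L - i := by
            have := dvd_sub hdvd hi3
            simpa [sub_sub_sub_cancel_right] using this
          simpa [show L - k - i = (L - i) - k by ring] using dvd_sub d1 (dvd_refl k)
        obtain ⟨m, hm⟩ := hdl
        have hm1 : 1 ≤ m := by nlinarith
        have hik : i + k ≤ L - k := by nlinarith
        congr 1
        rw [pv_slice_take _ _ _ _ (by omega) (by omega) (by omega)]
      rw [hg]
      have htake : t.take (L % k).toNat = (t.take (t.length - k.toNat)).take (L % k).toNat := by
        rw [List.take_take, min_eq_left (by omega)]
      rw [htake]
      have hne' : t.take (t.length - k.toNat) ≠ [] := by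
        rw [← List.length_pos_iff]; omega
      have iht := ih (t.take (t.length - k.toNat)).length (by omega) _ rfl hne'
      rw [PySem.Int.mod_eq_emod_of_pos hk0, PySem.List.foldl_append_eq_flatMap] at iht
      rw [hcast, Int.sub_emod_right] at iht
      rw [PySem.List.slice_to _ hF0] at iht
      -- last chunk = drop
      have hlast : PySem.List.slice t (some (L - k)) (some (L - k + k))
          = t.drop (t.length - k.toNat) := by
        rw [sub_add_cancel, PySem.List.slice_toNat _ (by omega) (by omega)]
        have e1 : (L - k).toNat = t.length - k.toNat := by omega
        have e2 : L.toNat = t.length := by omega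
        rw [e1, e2, List.take_of_length_le (by simp)]
      rw [List.flatMap_cons, List.flatMap_nil, List.append_nil, hlast]
      rw [← List.append_assoc, iht]
      conv_rhs => rw [pvChunks]
      rw [dif_neg (by omega), pv_join_append_singleton _ _ _ (pvChunks_ne_nil _ _)]
      simp [List.append_assoc]

-- A's final value, in chunk form
theorem pv_A_final (s : String) (k : Int) (hk : 1 ≤ k) :
    licenseKeyFormatting s k =
      if pvClean s = [] then ""
      else String.ofList (PySem.Chars.join ['-'] (pvChunks (pvClean s) k.toNat)) := by
  have hk0 : (0:Int) < k := by omega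
  simp only [licenseKeyFormatting]
  by_cases ht : pvClean s = []
  · rw [if_pos ht]
    have ht' : PySem.Chars.upper (PySem.Chars.replace s.toList ['-'] []) = [] := ht
    simp [ht']
  · rw [if_neg ht]
    have hcleandef : PySem.Chars.upper (PySem.Chars.replace s.toList ['-'] []) = pvClean s := rfl
    rw [hcleandef, if_neg ht]
    set t := pvClean s with htdef
    have hnd : '-' ∉ t := pv_dash_not_mem s
    have hne : t ≠ [] := ht
    have hraw := pv_A_raw k hk t.length t rfl hne
    have hF0 : 0 ≤ PySem.Int.mod (t.length : Int) k := by
      rw [PySem.Int.mod_eq_emod_of_pos hk0]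
      exact Int.emod_nonneg _ (by omega)
    have hlen : 0 < t.length := List.length_pos_of_ne_nil hne
    have hhead : PySem.List.pyGet?
        ((PySem.List.pyRange (PySem.Int.mod (t.length : Int) k) (t.length : Int) k).foldl
          (fun acc i => acc ++ ('-' :: PySem.List.slice t (some i) (some (i + k))))
          (PySem.List.slice t none (some (PySem.Int.mod (t.length : Int) k)))) 0
        = (if PySem.Int.mod (t.length : Int) k = 0 then some '-' else t[0]?) := by
      rw [PySem.List.foldl_append_eq_flatMap, PySem.List.slice_to _ hF0, PySem.List.pyGet?_zero]
      by_cases hF : PySem.Int.mod (t.length : Int) k = 0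
      · simp only [hF, Int.toNat_zero, List.take_zero, List.nil_append, if_pos]
        rw [pv_pyRange_pos_cons 0 _ k hk0 (by exact_mod_cast hlen)]
        simp
      · rw [if_neg hF]
        have hFpos : 0 < (PySem.Int.mod (t.length : Int) k).toNat := by omega
        rw [List.getElem?_append_left (by simp; omega), List.getElem?_take_of_lt hFpos]
    rw [hraw] at hhead ⊢
    by_cases hF : PySem.Int.mod (t.length : Int) k = 0
    · rw [if_pos (by rw [hhead, if_pos hF])]
      rw [if_pos hF]
      rw [PySem.List.slice_from_one]
      rfl
    · have hhead' : PySem.List.pyGet?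
          ((if PySem.Int.mod (t.length : Int) k = 0 then ['-'] else []) ++
            PySem.Chars.join ['-'] (pvChunks t k.toNat)) 0 ≠ some '-' := by
        rw [hhead, if_neg hF]
        exact pv_head_ne t hne hnd
      rw [if_neg hhead', if_neg hF, List.nil_append]

-- B-side: the dash-skipping fold over the raw characters is the plain fold over the cleaned ones
theorem pv_fold_skip (k : Int) :
    ∀ (l : List Char) (st : List Char × Int),
      l.foldl (fun st c => if c != '-' then pvStep k st (PySem.Chars.upperChar c) else st) st
      = ((l.filter (fun c => c != '-')).map PySem.Chars.upperChar).foldl (pvStep k) st := by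
  intro l
  induction l with
  | nil => intro st; rfl
  | cons c rest ih =>
    intro st
    by_cases hc : (c != '-') = true
    · rw [List.foldl_cons, if_pos hc, ih, List.filter_cons, if_pos hc, List.map_cons,
        List.foldl_cons]
    · rw [List.foldl_cons, if_neg hc, ih, List.filter_cons, if_neg hc]

-- no dash is emitted while the counter stays off the positive multiples of k
theorem pv_fold_no_dash (k : Int) :
    ∀ (r out : List Char) (c : Int),
      (∀ m : Nat, m < r.length → c + (m : Int) = 0 ∨ PySem.Int.mod (c + (m : Int)) k ≠ 0) →
      r.foldl (pvStep k) (out, c) = (out ++ r, c + (r.length : Int)) := by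
  intro r
  induction r with
  | nil => intro out c _; simp
  | cons d rest ih =>
    intro out c h
    have h0 := h 0 (by simp)
    simp only [Int.natCast_zero, add_zero] at h0
    have hcond : ¬ (c ≠ 0 ∧ PySem.Int.mod c k = 0) := by tauto
    simp only [List.foldl_cons, pvStep, if_neg hcond]
    rw [ih (out ++ [d]) (c + 1) (fun m hm => by
      have h1 := h (m + 1) (by simp; omega)
      have e : c + 1 + (m : Int) = c + ((m + 1 : Nat) : Int) := by push_cast; ring
      rw [e]
      exact h1)]
    simp only [Prod.mk.injEq, List.length_cons]
    constructor
    · simp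
    · push_cast; ring

-- one chunk's worth of characters: a single dash (iff the counter is already positive), then the chars
theorem pv_fold_chunk (k : Int) (hk : 1 ≤ k) (r out : List Char) (c : Int)
    (hc0 : 0 ≤ c) (hck : PySem.Int.mod c k = 0) (hne : r ≠ []) (hrl : (r.length : Int) ≤ k) :
    r.foldl (pvStep k) (out, c)
      = (out ++ (if c = 0 then [] else ['-']) ++ r, c + (r.length : Int)) := by
  have hk0 : (0:Int) < k := by omega
  obtain ⟨q, hq⟩ : k ∣ c := by
    rw [PySem.Int.mod_eq_emod_of_pos hk0] at hck
    exact Int.dvd_of_emod_eq_zero hck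
  cases r with
  | nil => exact absurd rfl hne
  | cons d rest =>
    have hstep : pvStep k (out, c) d
        = (out ++ (if c = 0 then [] else ['-']) ++ [d], c + 1) := by
      by_cases hc : c = 0
      · simp [pvStep, hc]
      · simp [pvStep, hc, hck]
    rw [List.foldl_cons, hstep]
    have hrl' : (rest.length : Int) + 1 ≤ k := by
      simp only [List.length_cons] at hrl
      push_cast at hrl
      omega
    rw [pv_fold_no_dash k rest _ (c + 1) (fun m hm => by
      right
      have hmi : (m : Int) < (rest.length : Int) := by exact_mod_cast hm
      have he : c + 1 + (m : Int) = (1 + (m : Int)) + k * q := by rw [hq]; ring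
      rw [PySem.Int.mod_eq_emod_of_pos hk0, he, Int.add_mul_emod_self_left,
        Int.emod_eq_of_lt (by positivity) (by omega)]
      omega)]
    simp only [Prod.mk.injEq, List.length_cons]
    constructor
    · simp
    · push_cast; ring

-- the whole right-to-left pass, characterised by the chunk decomposition (reversed)
theorem pv_B_fold (k : Int) (hk : 1 ≤ k) :
    ∀ (n : Nat) (t : List Char), t.length = n → t ≠ [] →
      ∀ (out : List Char) (c : Int), 0 ≤ c → PySem.Int.mod c k = 0 →
      t.reverse.foldl (pvStep k) (out, c)
        = (out ++ (if c = 0 then [] else ['-'])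
            ++ (PySem.Chars.join ['-'] (pvChunks t k.toNat)).reverse, c + (t.length : Int)) := by
  intro n
  induction n using Nat.strong_induction_on with
  | _ n ih =>
    intro t ht hne out c hc0 hck
    have hkc : ((k.toNat : Int)) = k := Int.toNat_of_nonneg (by omega)
    by_cases hsmall : t.length ≤ k.toNat
    · rw [pvChunks, dif_pos (Or.inl hsmall), PySem.Chars.join_singleton]
      simpa using pv_fold_chunk k hk t.reverse out c hc0 hck (by simpa using hne)
        (by simp; omega)
    · have hk1 : 1 ≤ k.toNat := by omega
      have hsplit : t.reverse
          = (t.drop (t.length - k.toNat)).reverse ++ (t.take (t.length - k.toNat)).reverse := by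
        rw [← List.reverse_append, List.take_append_drop]
      have hdlen : (t.drop (t.length - k.toNat)).length = k.toNat := by
        simp; omega
      have hdne : (t.drop (t.length - k.toNat)).reverse ≠ [] := by
        rw [← List.length_pos_iff]; simp [hdlen]; omega
      rw [hsplit, List.foldl_append]
      rw [pv_fold_chunk k hk _ out c hc0 hck hdne (by simp [hdlen]; omega)]
      simp only [List.length_reverse]
      have htne : t.take (t.length - k.toNat) ≠ [] := by
        rw [← List.length_pos_iff]; simp; omega
      have hc' : PySem.Int.mod (c + ((t.drop (t.length - k.toNat)).length : Int)) k = 0 := by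
        rw [hdlen, hkc, PySem.Int.mod_eq_emod_of_pos (by omega : (0:Int) < k),
          show c + k = c + k * 1 by ring, Int.add_mul_emod_self_left]
        rw [PySem.Int.mod_eq_emod_of_pos (by omega : (0:Int) < k)] at hck
        exact hck
      rw [ih (t.take (t.length - k.toNat)).length (by simp; omega) _ rfl htne _ _
        (by positivity) hc']
      have hcpos : ¬ (c + ((t.drop (t.length - k.toNat)).length : Int) = 0) := by
        rw [hdlen]; omega
      rw [if_neg hcpos]
      conv_rhs => rw [pvChunks]
      rw [dif_neg (by omega), pv_join_append_singleton _ _ _ (pvChunks_ne_nil _ _)]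
      simp only [Prod.mk.injEq]
      constructor
      · simp [List.append_assoc]
      · simp only [hdlen, List.length_take]
        push_cast
        omega

-- B's final value, in chunk form
theorem pv_B_final (s : String) (k : Int) (hk : 1 ≤ k) :
    licenseKeyFormatting_alt s k =
      if pvClean s = [] then ""
      else String.ofList (PySem.Chars.join ['-'] (pvChunks (pvClean s) k.toNat)) := by
  simp only [licenseKeyFormatting_alt]
  rw [pv_fold_skip]
  have hmr : (s.toList.reverse.filter (fun c => c != '-')).map PySem.Chars.upperChar
      = (pvClean s).reverse := by
    rw [pv_clean_eq, List.filter_reverse, List.map_reverse]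
  rw [hmr]
  by_cases ht : pvClean s = []
  · rw [if_pos ht, ht]
    rfl
  · rw [if_neg ht]
    rw [pv_B_fold k hk (pvClean s).length (pvClean s) rfl ht [] 0 le_rfl
      (by simp [PySem.Int.mod_eq_emod_of_pos (show (0:Int) < k by omega)])]
    simp

-- both programs return "" when the cleaned key is empty, whatever k is
theorem pv_empty (s : String) (k : Int) (ht : pvClean s = []) :
    licenseKeyFormatting s k = "" ∧ licenseKeyFormatting_alt s k = "" := by
  have ht' : PySem.Chars.upper (PySem.Chars.replace s.toList ['-'] []) = [] := ht
  constructor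
  · simp [licenseKeyFormatting, ht']
  · simp only [licenseKeyFormatting_alt]
    rw [pv_fold_skip]
    have hmr : (s.toList.reverse.filter (fun c => c != '-')).map PySem.Chars.upperChar
        = (pvClean s).reverse := by
      rw [pv_clean_eq, List.filter_reverse, List.map_reverse]
    rw [hmr, ht]
    rfl

-- ===== VERDICT (by name: the statement is the Claim_ definition above) =====
theorem licenseKeyFormatting_spec : Claim_equal_licenseKeyFormatting := by
  unfold Claim_equal_licenseKeyFormatting
  intro s k _ hpre
  unfold Spec_licenseKeyFormatting
  rcases hpre with hk | ⟨_, h0⟩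
  · rw [pv_A_final s k hk, pv_B_final s k hk]
  · have hlen : (s.toList.filter (fun c => c != '-')).length = 0 := by
      have := h0
      unfold pvCleanLen at this
      exact_mod_cast this
    have ht : pvClean s = [] := by
      rw [pv_clean_eq, List.length_eq_zero_iff.mp hlen]
      rfl
    obtain ⟨hA, hB⟩ := pv_empty s k ht
    rw [hA, hB]
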